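-- pv_equiv track=rewrite | github.com/ccbling26/leetcode | 1599/solution.py | minOperationsMaxProfit
-- ===== SOURCE A (Python) =====
-- from typing import List
--
-- def minOperationsMaxProfit(customers: List[int], boardingCost: int, runningCost: int) -> int:
--     if 4 * boardingCost <= runningCost:
--         return -1
--     min_round, cur_round, max_profits, cur_profits, rest_num = 0, 0, 0, 0, 0
--     i, n = 0, len(customers)
--     while i < n or rest_num:
--         if i < n:
--             rest_num += customers[i]
--             i += 1
--         cur_profits += min(4, rest_num) * boardingCost - runningCost
--         cur_round += 1
--         if cur_profits > max_profits:
--             max_profits = cur_profits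
--             min_round = cur_round
--         rest_num -= min(rest_num, 4)
--     return min_round if min_round else -1
-- ===== SOURCE B (Python) =====
-- def minOperationsMaxProfit(customers, boardingCost, runningCost):
--     if 4 * boardingCost <= runningCost:
--         return -1
--     rest = profit = best = best_round = rnd = 0
--     for c in customers:
--         rest += c
--         profit += min(4, rest) * boardingCost - runningCost
--         rnd += 1
--         if profit > best:
--             best, best_round = profit, rnd
--         rest -= min(rest, 4)
--     # leftover rest >= 0: drain it in closed form (profit rises by d each full round)
--     d = 4 * boardingCost - runningCost
--     k, r = divmod(rest, 4)
--     if k > 0 and profit + k * d > best: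
--         best, best_round = profit + k * d, rnd + k
--     if r > 0 and profit + k * d + r * boardingCost - runningCost > best:
--         best_round = rnd + k + 1
--     return best_round if best_round else -1
-- ===== Notes on version B (the rewrite author's own statement) =====
-- stated objective: faster
-- what changed: A drains the leftover queue one 4-person round at a time (O(sum(customers)) iterations); B runs only the n per-customer rounds and replaces the entire drain loop by O(1) arithmetic on rest//4 and rest%4, using that each full drain round adds the same positive profit 4*boardingCost-runningCost.
import Mathlib
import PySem

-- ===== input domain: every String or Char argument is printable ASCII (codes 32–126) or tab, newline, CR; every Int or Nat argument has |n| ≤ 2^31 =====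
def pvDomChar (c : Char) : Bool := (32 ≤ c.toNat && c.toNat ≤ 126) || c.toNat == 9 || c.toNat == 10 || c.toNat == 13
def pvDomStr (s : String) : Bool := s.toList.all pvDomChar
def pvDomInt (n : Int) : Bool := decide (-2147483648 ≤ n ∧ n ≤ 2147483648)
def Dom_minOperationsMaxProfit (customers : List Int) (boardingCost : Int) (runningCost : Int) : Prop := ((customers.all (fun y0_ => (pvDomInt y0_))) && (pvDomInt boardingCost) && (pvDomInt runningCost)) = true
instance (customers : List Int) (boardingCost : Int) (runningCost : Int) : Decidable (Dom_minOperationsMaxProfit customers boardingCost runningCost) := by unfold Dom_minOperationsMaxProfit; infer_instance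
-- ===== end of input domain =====

-- B replaces A's O(sum customers) leftover-draining loop by O(1) arithmetic on rest // 4 and
-- rest % 4 (the drain profit rises by a fixed positive amount per full round), making the whole
-- function O(n); the per-customer phase is unchanged.

-- ===== PORT A =====
-- A's single while-loop: while there are unread customers or waiting people, board min(4,rest).
def pvAloop (b rc : Int) : List Int → Int → Int → Int → Int → Int → Int
  | c :: cs, rest, p, m, mr, rd =>
      let rest1 := rest + c
      let p1 := p + min 4 rest1 * b - rc
      let rd1 := rd + 1
      pvAloop b rc cs (rest1 - min rest1 4) p1 (if p1 > m then p1 else m)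
        (if p1 > m then rd1 else mr) rd1
  | [], rest, p, m, mr, rd =>
      if rest ≠ 0 then
        let p1 := p + min 4 rest * b - rc
        let rd1 := rd + 1
        pvAloop b rc [] (rest - min rest 4) p1 (if p1 > m then p1 else m)
          (if p1 > m then rd1 else mr) rd1
      else if mr ≠ 0 then mr else -1
  termination_by cs rest => (cs.length, rest.toNat + (if rest = 0 then 0 else 1))
  decreasing_by
  · exact Prod.Lex.left _ _ (by simp)
  · apply Prod.Lex.right
    rcases le_or_gt rest 4 with h4 | h4
    · rw [min_eq_left h4]; split_ifs <;> omega
    · rw [min_eq_right (by omega : (4:Int) ≤ rest)]; split_ifs <;> omega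

def minOperationsMaxProfit (customers : List Int) (boardingCost : Int) (runningCost : Int) : Int :=
  if 4 * boardingCost ≤ runningCost then -1
  else pvAloop boardingCost runningCost customers 0 0 0 0 0

-- ===== PORT B =====
-- B's per-customer step (identical rules to a single round with a fresh customer).
def pvBstep (b rc : Int) (st : Int × Int × Int × Int × Int) (c : Int) : Int × Int × Int × Int × Int :=
  let rest1 := st.1 + c
  let p1 := st.2.1 + min 4 rest1 * b - rc
  let rd1 := st.2.2.2.2 + 1
  (rest1 - min rest1 4, p1, (if p1 > st.2.2.1 then p1 else st.2.2.1),
   (if p1 > st.2.2.1 then rd1 else st.2.2.2.1), rd1)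

-- B's closed-form drain of the leftover queue (rest // 4 full rounds, then a partial round).
def pvBfinish (b rc rest p m mr rd : Int) : Int :=
  let d := 4 * b - rc
  let k := PySem.Int.floordiv rest 4
  let r := PySem.Int.mod rest 4
  let m1 := if k > 0 ∧ p + k * d > m then p + k * d else m
  let mr1 := if k > 0 ∧ p + k * d > m then rd + k else mr
  let mr2 := if r > 0 ∧ p + k * d + r * b - rc > m1 then rd + k + 1 else mr1
  if mr2 ≠ 0 then mr2 else -1

def minOperationsMaxProfit_alt (customers : List Int) (boardingCost : Int) (runningCost : Int) : Int :=
  if 4 * boardingCost ≤ runningCost then -1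
  else
    let st := customers.foldl (pvBstep boardingCost runningCost) (0, 0, 0, 0, 0)
    pvBfinish boardingCost runningCost st.1 st.2.1 st.2.2.1 st.2.2.2.1 st.2.2.2.2

-- ===== PRECONDITION & SPEC =====
def Spec_minOperationsMaxProfit (customers : List Int) (boardingCost : Int) (runningCost : Int) (out : Int) : Prop := out = minOperationsMaxProfit_alt customers boardingCost runningCost
instance (customers : List Int) (boardingCost : Int) (runningCost : Int) (out : Int) : Decidable (Spec_minOperationsMaxProfit customers boardingCost runningCost out) := by unfold Spec_minOperationsMaxProfit; infer_instance

-- ===== CLAIM (what is proved, stated in full; the proofs are below) =====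
def Claim_equal_minOperationsMaxProfit : Prop := ∀ (customers : List Int) (boardingCost : Int) (runningCost : Int), Dom_minOperationsMaxProfit customers boardingCost runningCost → Spec_minOperationsMaxProfit customers boardingCost runningCost (minOperationsMaxProfit customers boardingCost runningCost)

-- ===== LEMMAS AND PROOFS =====

-- Proof-side abstraction of pvBfinish with the drain parameters k (full rounds), r (remainder)
-- and the per-round profit d explicit.
def pvGfin (b rc d k r p m mr rd : Int) : Int :=
  let m1 := if k > 0 ∧ p + k * d > m then p + k * d else m
  let mr1 := if k > 0 ∧ p + k * d > m then rd + k else mr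
  let mr2 := if r > 0 ∧ p + k * d + r * b - rc > m1 then rd + k + 1 else mr1
  if mr2 ≠ 0 then mr2 else -1

theorem pvBfinish_eq_gfin (b rc rest p m mr rd : Int) :
    pvBfinish b rc rest p m mr rd =
      pvGfin b rc (4 * b - rc) (PySem.Int.floordiv rest 4) (PySem.Int.mod rest 4) p m mr rd := rfl

-- Absorbing one full drain round into the closed form.
set_option maxHeartbeats 1000000 in
theorem pvGfin_step (b rc d k r p m mr rd : Int) (hd : 0 < d) (hk : 0 ≤ k) :
    pvGfin b rc d (k + 1) r p m mr rd =
      pvGfin b rc d k r (p + d) (if p + d > m then p + d else m)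
        (if p + d > m then rd + 1 else mr) (rd + 1) := by
  unfold pvGfin
  dsimp only
  have e1 : p + d + k * d = p + (k + 1) * d := by ring
  rw [e1]
  set X := p + (k + 1) * d with hX
  have hge : p + d ≤ X := by rw [hX]; nlinarith
  have hgt : 0 < k → p + d < X := by intro h; rw [hX]; nlinarith
  have heq : k = 0 → X = p + d := by intro h; rw [hX, h]; ring
  set Q := X + r * b - rc with hQ
  clear_value Q
  clear_value X
  rcases eq_or_lt_of_le hk with h0 | h0
  · have := heq h0.symm
    split_ifs <;> omega
  · have := hgt h0
    split_ifs <;> omega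

-- A's customer phase is pointwise the fold of B's step.
theorem pvAloop_phase (b rc : Int) (cs : List Int) :
    ∀ rest p m mr rd,
      pvAloop b rc cs rest p m mr rd =
        (let st := cs.foldl (pvBstep b rc) (rest, p, m, mr, rd)
         pvAloop b rc [] st.1 st.2.1 st.2.2.1 st.2.2.2.1 st.2.2.2.2) := by
  induction cs with
  | nil => intro rest p m mr rd; rfl
  | cons c cs ih =>
      intro rest p m mr rd
      rw [pvAloop]
      simp only [List.foldl_cons]
      exact ih _ _ _ _ _

-- The fold keeps rest nonnegative (each step produces a nonnegative rest).
theorem pvBstep_rest_nonneg (b rc : Int) (cs : List Int) :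
    ∀ st : Int × Int × Int × Int × Int, 0 ≤ st.1 →
      0 ≤ (cs.foldl (pvBstep b rc) st).1 := by
  induction cs with
  | nil => intro st h; simpa using h
  | cons c cs ih =>
      intro st h
      simp only [List.foldl_cons]
      apply ih
      simp only [pvBstep]
      rcases le_or_gt (st.1 + c) 4 with h4 | h4
      · simp [min_eq_left h4]
      · simp [min_eq_right (le_of_lt h4)]; omega

-- A's drain loop computes B's closed form when the queue is nonnegative and d > 0.
theorem pvAloop_drain (b rc : Int) (hd : rc < 4 * b) :
    ∀ n (rest p m mr rd : Int), rest.toNat = n → 0 ≤ rest →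
      pvAloop b rc [] rest p m mr rd = pvBfinish b rc rest p m mr rd := by
  intro n
  induction n using Nat.strong_induction_on with
  | _ n ih =>
    intro rest p m mr rd hn h0
    rcases eq_or_lt_of_le h0 with h | hpos
    · -- rest = 0
      rw [← h, pvAloop]
      simp [pvBfinish]
    · have hk0 := (PySem.Int.floordiv_eq_iff_of_pos (a := rest) (b := 4)
        (q := PySem.Int.floordiv rest 4) (by omega)).mp rfl
      have hm0 := PySem.Int.floordiv_mul_add_mod rest 4
      rcases lt_or_ge rest 4 with h4 | h4
      · -- 0 < rest < 4 : one final partial round, then rest = 0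
        rw [pvAloop]
        simp only [if_pos (by omega : rest ≠ 0), min_eq_right (le_of_lt h4),
          min_eq_left (le_of_lt h4), sub_self]
        rw [pvAloop]
        simp only [if_neg (by omega : ¬ (0:Int) ≠ 0)]
        have hk : PySem.Int.floordiv rest 4 = 0 := by omega
        have hr : PySem.Int.mod rest 4 = rest := by omega
        rw [pvBfinish_eq_gfin]
        simp only [pvGfin, hk, hr]
        have e : p + 0 * (4 * b - rc) + rest * b - rc = p + rest * b - rc := by ring
        rw [e]
        generalize p + rest * b - rc = W
        split_ifs <;> omega
      · -- rest ≥ 4 : one full round, then the closed form absorbs it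
        have hk1 := (PySem.Int.floordiv_eq_iff_of_pos (a := rest - 4) (b := 4)
          (q := PySem.Int.floordiv (rest - 4) 4) (by omega)).mp rfl
        have hm1 := PySem.Int.floordiv_mul_add_mod (rest - 4) 4
        have hk4 : PySem.Int.floordiv rest 4 = PySem.Int.floordiv (rest - 4) 4 + 1 := by omega
        have hr4 : PySem.Int.mod rest 4 = PySem.Int.mod (rest - 4) 4 := by omega
        rw [pvAloop]
        simp only [if_pos (by omega : rest ≠ 0),
          min_eq_left (by omega : (4:Int) ≤ rest),
          min_eq_right (by omega : (4:Int) ≤ rest)]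
        rw [ih (rest - 4).toNat (by omega) _ _ _ _ _ rfl (by omega)]
        rw [pvBfinish_eq_gfin, pvBfinish_eq_gfin, hk4, hr4]
        have ep : p + 4 * b - rc = p + (4 * b - rc) := by ring
        rw [ep]
        exact (pvGfin_step b rc (4 * b - rc) (PySem.Int.floordiv (rest - 4) 4)
          (PySem.Int.mod (rest - 4) 4) p m mr rd (by omega) (by omega)).symm

-- ===== VERDICT (by name: the statement is the Claim_ definition above) =====
theorem minOperationsMaxProfit_spec : Claim_equal_minOperationsMaxProfit := by
  intro cs b rc _
  unfold Spec_minOperationsMaxProfit minOperationsMaxProfit minOperationsMaxProfit_alt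
  by_cases hg : 4 * b ≤ rc
  · simp [hg]
  · simp only [if_neg hg]
    rw [pvAloop_phase]
    have h0 : 0 ≤ (cs.foldl (pvBstep b rc) (0,0,0,0,0)).1 :=
      pvBstep_rest_nonneg b rc cs _ (by norm_num)
    exact pvAloop_drain b rc (by omega) _ _ _ _ _ _ rfl h0
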